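-- pv_equiv track=rewrite | github.com/Geoff-Walker/AppFactory-Architecture | graphs/github_api.py | _classify_check_runs
-- ===== SOURCE A (Python) =====
-- def _classify_check_runs(check_runs: list) -> str:
--     """Inspect a check-runs list and classify the overall state.
--
--     Returns one of: ``"all_pass"``, ``"some_failed"``, ``"still_running"``,
--     ``"none"`` (no checks present at all).
--     """
--     if not check_runs:
--         return "none"
--
--     passing_conclusions = {"success", "neutral", "skipped"}
--     failing_conclusions = {"failure", "cancelled", "timed_out", "action_required", "stale"}
--
--     any_running = False
--     for run in check_runs:
--         status = run.get("status")
--         if status in ("queued", "in_progress", "waiting", "pending", "requested"):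
--             any_running = True
--             continue
--         # status == "completed" → look at conclusion
--         conclusion = run.get("conclusion")
--         if conclusion in failing_conclusions:
--             return "some_failed"
--         if conclusion not in passing_conclusions:
--             # Unknown conclusion — be safe, treat as still running so we wait
--             any_running = True
--
--     return "still_running" if any_running else "all_pass"
-- ===== SOURCE B (Python) =====
-- def _classify_check_runs(check_runs: list) -> str:
--     """Bulk set algebra: gather conclusions of non-running runs, then decide
--     by set intersection/difference instead of a per-run scan with a flag."""
--     if not check_runs:
--         return "none"
--
--     RUNNING = {"queued", "in_progress", "waiting", "pending", "requested"}
--     FAILING = {"failure", "cancelled", "timed_out", "action_required", "stale"}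
--     PASSING = {"success", "neutral", "skipped"}
--
--     conclusions = {run.get("conclusion") for run in check_runs
--                    if run.get("status") not in RUNNING}
--     if conclusions & FAILING:
--         return "some_failed"
--     if (conclusions - PASSING) or any(run.get("status") in RUNNING for run in check_runs):
--         return "still_running"
--     return "all_pass"
-- ===== Notes on version B (the rewrite author's own statement) =====
-- stated objective: alternative
-- what changed: Replaces A's single early-return scan with a boolean flag by bulk set algebra: first collect the set of conclusions of all non-running runs, then decide via set intersection with the failing set and set difference against the passing set, plus an any() over statuses.
import Mathlib
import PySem

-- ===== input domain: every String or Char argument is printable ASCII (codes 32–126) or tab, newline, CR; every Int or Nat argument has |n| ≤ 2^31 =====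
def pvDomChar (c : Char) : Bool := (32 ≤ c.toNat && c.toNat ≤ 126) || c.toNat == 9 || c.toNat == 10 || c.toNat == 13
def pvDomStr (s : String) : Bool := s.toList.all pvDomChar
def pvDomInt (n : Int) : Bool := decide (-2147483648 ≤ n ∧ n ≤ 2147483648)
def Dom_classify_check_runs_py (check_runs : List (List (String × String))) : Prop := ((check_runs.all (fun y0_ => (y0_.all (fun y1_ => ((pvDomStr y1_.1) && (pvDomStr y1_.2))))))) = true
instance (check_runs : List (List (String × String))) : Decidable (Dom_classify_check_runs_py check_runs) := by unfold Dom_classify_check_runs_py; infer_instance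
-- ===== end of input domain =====

-- ===== PORT A =====
-- B replaces A's single early-return scan (boolean flag) with bulk set algebra over the collected conclusions (objective: alternative); same return value.
def pvRunningStatuses : List (Option String) :=
  [some "queued", some "in_progress", some "waiting", some "pending", some "requested"]
def pvFailingConclusions : List (Option String) :=
  [some "failure", some "cancelled", some "timed_out", some "action_required", some "stale"]
def pvPassingConclusions : List (Option String) :=
  [some "success", some "neutral", some "skipped"]

def pvClassifyLoop : List (List (String × String)) → Bool → String
  | [], anyRunning => if anyRunning then "still_running" else "all_pass"
  | run :: rest, anyRunning =>
    if pvRunningStatuses.contains ((PySem.Dict.mk run).get? "status") then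
      pvClassifyLoop rest true
    else
      if pvFailingConclusions.contains ((PySem.Dict.mk run).get? "conclusion") then "some_failed"
      else if !(pvPassingConclusions.contains ((PySem.Dict.mk run).get? "conclusion")) then pvClassifyLoop rest true
      else pvClassifyLoop rest anyRunning

def classify_check_runs_py (check_runs : List (List (String × String))) : String :=
  if check_runs = [] then "none" else pvClassifyLoop check_runs false

-- ===== PORT B =====
def pvbStatus (r : List (String × String)) : Option String := (PySem.Dict.mk r).get? "status"
def pvbConcl (r : List (String × String)) : Option String := (PySem.Dict.mk r).get? "conclusion"

def classify_check_runs_py_alt (check_runs : List (List (String × String))) : String :=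
  if check_runs = [] then "none" else
  -- conclusions = {run.get("conclusion") for run in check_runs if run.get("status") not in RUNNING}
  let conclusions : PySem.Set (Option String) :=
    PySem.Set.ofList ((check_runs.filter (fun r => !(pvRunningStatuses.contains (pvbStatus r)))).map pvbConcl)
  -- conclusions & FAILING (truthy = nonempty)
  if PySem.Set.inter conclusions pvFailingConclusions ≠ [] then "some_failed"
  -- (conclusions - PASSING) or any(run.get("status") in RUNNING ...)
  else if PySem.Set.diff conclusions pvPassingConclusions ≠ [] ∨
          check_runs.any (fun r => pvRunningStatuses.contains (pvbStatus r)) then "still_running"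
  else "all_pass"

-- ===== PRECONDITION & SPEC =====
def Spec_classify_check_runs_py (check_runs : List (List (String × String))) (out : String) : Prop := out = classify_check_runs_py_alt check_runs
instance (check_runs : List (List (String × String))) (out : String) : Decidable (Spec_classify_check_runs_py check_runs out) := by unfold Spec_classify_check_runs_py; infer_instance

-- ===== CLAIM (what is proved, stated in full; the proofs are below) =====
def Claim_equal_classify_check_runs_py : Prop := ∀ (check_runs : List (List (String × String))), Dom_classify_check_runs_py check_runs → Spec_classify_check_runs_py check_runs (classify_check_runs_py check_runs)

-- ===== LEMMAS AND PROOFS =====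

-- the per-run predicates the loop invariant talks about
def pvIsFail (r : List (String × String)) : Bool :=
  !(pvRunningStatuses.contains (pvbStatus r)) && pvFailingConclusions.contains (pvbConcl r)
def pvIsRun (r : List (String × String)) : Bool :=
  pvRunningStatuses.contains (pvbStatus r) || !(pvPassingConclusions.contains (pvbConcl r))

lemma pvClassifyLoop_eq (l : List (List (String × String))) (b : Bool) :
    pvClassifyLoop l b =
      (if l.any pvIsFail then "some_failed"
       else if b || l.any pvIsRun then "still_running"
       else "all_pass") := by
  induction l generalizing b with
  | nil => cases b <;> rfl
  | cons run rest ih =>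
    simp only [pvClassifyLoop, List.any_cons]
    by_cases hs : pvRunningStatuses.contains ((PySem.Dict.mk run).get? "status") = true
    · have hs' : pvbStatus run ∈ pvRunningStatuses := by simpa [pvbStatus] using hs
      rw [if_pos hs, ih]
      have h1 : pvIsFail run = false := by simp [pvIsFail, hs']
      have h2 : pvIsRun run = true := by simp [pvIsRun, hs']
      simp [h1, h2]
    · have hs' : pvbStatus run ∉ pvRunningStatuses := by simpa [pvbStatus] using hs
      rw [if_neg hs]
      by_cases hf : pvFailingConclusions.contains ((PySem.Dict.mk run).get? "conclusion") = true
      · have hf' : pvbConcl run ∈ pvFailingConclusions := by simpa [pvbConcl] using hf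
        rw [if_pos hf]
        have h1 : pvIsFail run = true := by simp [pvIsFail, hs', hf']
        simp [h1]
      · have hf' : pvbConcl run ∉ pvFailingConclusions := by simpa [pvbConcl] using hf
        rw [if_neg hf]
        have h1 : pvIsFail run = false := by simp [pvIsFail, hf']
        by_cases hp : pvPassingConclusions.contains ((PySem.Dict.mk run).get? "conclusion") = true
        · have hp' : pvbConcl run ∈ pvPassingConclusions := by simpa [pvbConcl] using hp
          rw [if_neg (by rw [hp]; decide), ih]
          have h2 : pvIsRun run = false := by simp [pvIsRun, hs', hp']
          simp [h1, h2]
        · have hp' : pvbConcl run ∉ pvPassingConclusions := by simpa [pvbConcl] using hp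
          have hpf : pvPassingConclusions.contains ((PySem.Dict.mk run).get? "conclusion") = false := by
            simpa using hp
          rw [if_pos (by rw [hpf]; decide), ih]
          have h2 : pvIsRun run = true := by simp [pvIsRun, hp']
          simp [h1, h2]

-- a Python set is truthy iff nonempty iff some element is in it
lemma pvSet_inter_ne_nil (s : List (Option String)) (t : List (Option String)) :
    (PySem.Set.inter (PySem.Set.ofList s) t ≠ []) ↔ ∃ x ∈ s, x ∈ t := by
  constructor
  · intro h
    obtain ⟨x, hx⟩ := List.exists_mem_of_ne_nil _ h
    have := (PySem.Set.mem_inter _ _ _).mp hx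
    exact ⟨x, (PySem.Set.mem_ofList _ _).mp this.1, this.2⟩
  · rintro ⟨x, hxs, hxt⟩ hnil
    have : x ∈ PySem.Set.inter (PySem.Set.ofList s) t :=
      (PySem.Set.mem_inter _ _ _).mpr ⟨(PySem.Set.mem_ofList _ _).mpr hxs, hxt⟩
    simp [hnil] at this

lemma pvSet_diff_ne_nil (s : List (Option String)) (t : List (Option String)) :
    (PySem.Set.diff (PySem.Set.ofList s) t ≠ []) ↔ ∃ x ∈ s, x ∉ t := by
  constructor
  · intro h
    obtain ⟨x, hx⟩ := List.exists_mem_of_ne_nil _ h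
    have := (PySem.Set.mem_diff _ _ _).mp hx
    exact ⟨x, (PySem.Set.mem_ofList _ _).mp this.1, this.2⟩
  · rintro ⟨x, hxs, hxt⟩ hnil
    have : x ∈ PySem.Set.diff (PySem.Set.ofList s) t :=
      (PySem.Set.mem_diff _ _ _).mpr ⟨(PySem.Set.mem_ofList _ _).mpr hxs, hxt⟩
    simp [hnil] at this

-- B's first condition coincides with "some run fails"
lemma pv_cond_fail (cr : List (List (String × String))) :
    (PySem.Set.inter
        (PySem.Set.ofList ((cr.filter (fun r => !(pvRunningStatuses.contains (pvbStatus r)))).map pvbConcl))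
        pvFailingConclusions ≠ []) ↔ (cr.any pvIsFail = true) := by
  rw [pvSet_inter_ne_nil]
  simp only [List.mem_map, List.mem_filter, List.any_eq_true, pvIsFail, Bool.and_eq_true,
    Bool.not_eq_true', List.contains_eq_mem, decide_eq_true_eq, decide_eq_false_iff_not]
  constructor
  · rintro ⟨x, ⟨r, ⟨hr, hsr⟩, rfl⟩, hx⟩
    exact ⟨r, hr, hsr, hx⟩
  · rintro ⟨r, hr, hsr, hfr⟩
    exact ⟨pvbConcl r, ⟨r, ⟨hr, hsr⟩, rfl⟩, hfr⟩

-- B's second condition coincides with "some run is (treated as) running"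
lemma pv_cond_run (cr : List (List (String × String))) :
    ((PySem.Set.diff
        (PySem.Set.ofList ((cr.filter (fun r => !(pvRunningStatuses.contains (pvbStatus r)))).map pvbConcl))
        pvPassingConclusions ≠ []) ∨
      (cr.any (fun r => pvRunningStatuses.contains (pvbStatus r)) = true)) ↔
    (cr.any pvIsRun = true) := by
  rw [pvSet_diff_ne_nil]
  simp only [List.mem_map, List.mem_filter, List.any_eq_true, pvIsRun, Bool.or_eq_true,
    Bool.not_eq_true', List.contains_eq_mem, decide_eq_true_eq, decide_eq_false_iff_not]
  constructor
  · rintro (⟨x, ⟨r, ⟨hr, hsr⟩, rfl⟩, hx⟩ | ⟨r, hr, hsr⟩)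
    · exact ⟨r, hr, Or.inr hx⟩
    · exact ⟨r, hr, Or.inl hsr⟩
  · rintro ⟨r, hr, (hsr | hpr)⟩
    · exact Or.inr ⟨r, hr, hsr⟩
    · by_cases hs : pvbStatus r ∈ pvRunningStatuses
      · exact Or.inr ⟨r, hr, hs⟩
      · exact Or.inl ⟨pvbConcl r, ⟨r, ⟨hr, hs⟩, rfl⟩, hpr⟩

-- ===== VERDICT (by name: the statement is the Claim_ definition above) =====
theorem classify_check_runs_py_spec : Claim_equal_classify_check_runs_py := by
  intro cr _
  unfold Spec_classify_check_runs_py classify_check_runs_py classify_check_runs_py_alt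
  by_cases h : cr = []
  · simp [h]
  · rw [if_neg h, if_neg h, pvClassifyLoop_eq]
    simp only [Bool.false_or]
    exact if_congr (pv_cond_fail cr).symm rfl (if_congr (pv_cond_run cr).symm rfl rfl)
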